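-- pv_equiv track=rewrite | github.com/kschulst/advent-of-code-2025 | solutions/day_03/solution.py | joltage_of
-- ===== SOURCE A (Python) =====
-- def joltage_of(bank: str, num_batteries_to_combine: int) -> int:
--     """Get the joltage of a battery given its string representation."""
--     batteries = [int(joltage) for joltage in bank]
--     selected_batteries: list[int] = []
--     num_batteries = len(batteries)
--     remaining_batteries_to_select = num_batteries - num_batteries_to_combine
--
--     for battery_size in batteries:
--         # Pop while there's a better battery coming
--         while (
--             selected_batteries
--             and remaining_batteries_to_select > 0
--             and battery_size > selected_batteries[-1]
--         ):
--             selected_batteries.pop()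
--             remaining_batteries_to_select -= 1
--         selected_batteries.append(battery_size)
--
--     # drop remaining from the end to get the target battery size
--     while remaining_batteries_to_select > 0 and selected_batteries:
--         selected_batteries.pop()
--         remaining_batteries_to_select -= 1
--
--     # combine the selected batteries into a joltage number
--     joltage = 0
--     for d in selected_batteries:
--         joltage = joltage * 10 + d
--
--     return joltage
-- ===== SOURCE B (Python) =====
-- def joltage_of(bank: str, num_batteries_to_combine: int) -> int:
--     """Get the joltage of a battery given its string representation."""
--     digits = [int(joltage) for joltage in bank]
--     n = len(digits)
--     k = min(num_batteries_to_combine, n)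
--     joltage = 0
--     start = 0
--     for j in range(max(k, 0)):
--         # pick the leftmost maximum digit that still leaves room for k-1-j more
--         window = digits[start : n - (k - 1 - j)]
--         m = max(window)
--         start += window.index(m) + 1
--         joltage = joltage * 10 + m
--     return joltage
-- ===== Notes on version B (the rewrite author's own statement) =====
-- stated objective: alternative
-- what changed: Replaces the greedy pop-stack (push each digit, popping smaller ones while deletions remain, then trimming the tail) by direct windowed selection: for each of the k output positions pick the leftmost maximum digit in the window that still leaves room for the remaining positions; no stack is maintained.
import Mathlib
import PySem

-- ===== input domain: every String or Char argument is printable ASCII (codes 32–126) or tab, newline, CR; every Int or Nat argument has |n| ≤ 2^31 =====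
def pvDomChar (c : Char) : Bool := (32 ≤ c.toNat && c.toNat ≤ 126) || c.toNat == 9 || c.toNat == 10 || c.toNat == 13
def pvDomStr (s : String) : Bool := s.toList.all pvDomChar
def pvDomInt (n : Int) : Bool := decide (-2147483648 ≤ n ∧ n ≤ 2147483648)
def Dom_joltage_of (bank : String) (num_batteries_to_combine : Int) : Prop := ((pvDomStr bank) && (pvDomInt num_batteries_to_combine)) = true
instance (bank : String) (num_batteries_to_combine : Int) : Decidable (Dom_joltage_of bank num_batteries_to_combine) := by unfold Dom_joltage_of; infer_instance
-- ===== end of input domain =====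

-- B replaces A's greedy pop-stack by per-position windowed leftmost-maximum selection
-- (a different algorithm of similar cost); equal return value on all digit-only banks.

-- ===== PORT A =====

-- `int(joltage)` for a single character; under `Pre_` it is an ASCII digit, so the
-- `getD 0` default is unreachable (Python raises ValueError exactly where ofChars? = none).
def pvDigit (c : Char) : Int := (PySem.Int.ofChars? [c]).getD 0

-- the inner `while … : selected_batteries.pop()` loop; the Python list's END (stack top)
-- is held at the HEAD of this list, so pop = tail.  Exact step-for-step otherwise.
def pvPopW : List Int → Int → Int → List Int × Int
  | [], _, r => ([], r)
  | t :: ts, d, r => if 0 < r ∧ t < d then pvPopW ts d (r - 1) else (t :: ts, r)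

-- the `for battery_size in batteries` loop: pop-phase then push.
def pvPhase1 : List Int → List Int → Int → List Int × Int
  | [], rs, r => (rs, r)
  | d :: t, rs, r =>
      let p := pvPopW rs d r
      pvPhase1 t (d :: p.1) p.2

-- the trailing `while remaining … : selected_batteries.pop()` loop (stack top at head).
def pvFinPop : List Int → Int → List Int
  | [], _ => []
  | x :: xs, r => if 0 < r then pvFinPop xs (r - 1) else x :: xs

-- the final `for d in selected_batteries: joltage = joltage * 10 + d` loop.
def pvFold (l : List Int) : Int := l.foldl (fun j d => j * 10 + d) 0

def joltage_of (bank : String) (num_batteries_to_combine : Int) : Int :=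
  let batteries := bank.toList.map pvDigit
  let res := pvPhase1 batteries [] ((batteries.length : Int) - num_batteries_to_combine)
  pvFold (pvFinPop res.1 res.2).reverse

-- ===== PORT B =====

-- the `for j in range(max(k, 0))` loop of Source B, by remaining count c (so j = k - c);
-- the `max(window)` / `window.index(m)` defaults are unreachable: whenever the loop
-- body runs the window is nonempty and m is a member.
def pvBLoop (digits : List Int) (n k : Int) : Nat → Int → Int → Int
  | 0, _, joltage => joltage
  | c + 1, start, joltage =>
      let j : Int := k - ((c : Int) + 1)
      let window := PySem.List.slice digits (some start) (some (n - (k - 1 - j)))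
      let m := (PySem.List.max? window (fun x => x)).getD 0
      let start' := start + (((PySem.List.index? window m).map (Int.ofNat)).getD 0) + 1
      pvBLoop digits n k c start' (joltage * 10 + m)

def joltage_of_alt (bank : String) (num_batteries_to_combine : Int) : Int :=
  let digits := bank.toList.map pvDigit
  let n : Int := (digits.length : Int)
  let k := min num_batteries_to_combine n
  pvBLoop digits n k (max k 0).toNat 0 0

-- ===== PRECONDITION & SPEC =====

-- Pre_ excludes exactly the banks containing a non-digit character, on which the
-- Python `int(joltage)` (in A and likewise in B) raises ValueError.
def Pre_joltage_of (bank : String) (num_batteries_to_combine : Int) : Prop :=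
  bank.toList.all Char.isDigit = true
instance (bank : String) (num_batteries_to_combine : Int) : Decidable (Pre_joltage_of bank num_batteries_to_combine) := by unfold Pre_joltage_of; infer_instance

def pvWitness_joltage_of : String × Int := ("3141592", 4)

def Spec_joltage_of (bank : String) (num_batteries_to_combine : Int) (out : Int) : Prop := out = joltage_of_alt bank num_batteries_to_combine
instance (bank : String) (num_batteries_to_combine : Int) (out : Int) : Decidable (Spec_joltage_of bank num_batteries_to_combine out) := by unfold Spec_joltage_of; infer_instance

-- ===== CLAIM (what is proved, stated in full; the proofs are below) =====
def Claim_equal_joltage_of : Prop := ∀ (bank : String) (num_batteries_to_combine : Int), Dom_joltage_of bank num_batteries_to_combine → Pre_joltage_of bank num_batteries_to_combine → Spec_joltage_of bank num_batteries_to_combine (joltage_of bank num_batteries_to_combine)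

-- ===== LEMMAS AND PROOFS =====

-- the whole of A after parsing, as a function of the digit list and the deletion budget
def pvAres (l : List Int) (r : Int) : List Int :=
  (pvFinPop (pvPhase1 l [] r).1 (pvPhase1 l [] r).2).reverse

-- abstract form of B's loop: pick the leftmost maximum of the feasible window, recurse
def pvChoose : Nat → List Int → List Int
  | 0, _ => []
  | k + 1, l =>
      match PySem.List.max? (l.take (l.length - k)) (fun x => x) with
      | none => []
      | some m =>
          m :: pvChoose k (l.drop (((PySem.List.index? (l.take (l.length - k)) m).getD 0) + 1))

theorem pvChoose_succ_some (k : Nat) (l : List Int) (m : Int)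
    (h : PySem.List.max? (l.take (l.length - k)) (fun x => x) = some m) :
    pvChoose (k + 1) l
      = m :: pvChoose k (l.drop (((PySem.List.index? (l.take (l.length - k)) m).getD 0) + 1)) := by
  simp only [pvChoose, h]

-- ---- pvPopW ----
theorem pvPopW_drop (s : List Int) (d r : Int) :
    ∃ p : Nat, pvPopW s d r = (s.drop p, r - p) ∧ p ≤ s.length ∧ ((0:Int) ≤ r → (p : Int) ≤ r) := by
  induction s generalizing r with
  | nil => exact ⟨0, by simp [pvPopW]⟩
  | cons x xs ih =>
      by_cases h : 0 < r ∧ x < d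
      · obtain ⟨p, hp, hlen, hnn⟩ := ih (r - 1)
        refine ⟨p + 1, ?_, by simpa using Nat.succ_le_succ hlen, ?_⟩
        · have e : r - 1 - (p : Int) = r - ((p + 1 : Nat) : Int) := by push_cast; ring
          simp only [pvPopW, if_pos h, hp, e, List.drop_succ_cons]
        · intro _
          have := hnn (by omega)
          push_cast at this ⊢; omega
      · exact ⟨0, by simp [pvPopW, h]⟩

theorem pvPopW_append (s : List Int) (a d r : Int)
    (h : (s.length : Int) < r → d ≤ a) :
    pvPopW (s ++ [a]) d r = ((pvPopW s d r).1 ++ [a], (pvPopW s d r).2) := by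
  induction s generalizing r with
  | nil =>
      have : ¬ (0 < r ∧ a < d) := by
        rintro ⟨hr, had⟩; exact absurd (h (by simpa using hr)) (by omega)
      simp [pvPopW, this]
  | cons x xs ih =>
      by_cases hc : 0 < r ∧ x < d
      · simp only [List.cons_append, pvPopW, hc, if_true, and_self]
        refine ih (r - 1) ?_
        intro hlt
        refine h ?_
        simp only [List.length_cons] at *
        push_cast at hlt ⊢; omega
      · simp [pvPopW, hc]

theorem pvPopW_through (a d : Int) (had : a < d) (s : List Int) :
    ∀ (r : Int), (∀ x ∈ s, x ≤ a) → (s.length : Int) < r →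
    pvPopW (s ++ [a]) d r = pvPopW s d (r - 1) := by
  induction s with
  | nil =>
      intro r _ hr
      have h0 : 0 < r := by simpa using hr
      simp [pvPopW, h0, had]
  | cons x xs ih =>
      intro r hs hr
      have hx : x < d := lt_of_le_of_lt (hs x (List.mem_cons_self)) had
      have h0 : 0 < r := by simp only [List.length_cons] at hr; push_cast at hr; omega
      have h0' : 0 < r - 1 := by simp only [List.length_cons] at hr; push_cast at hr; omega
      simp only [List.cons_append, pvPopW, h0, h0', hx, and_self, if_true]
      refine ih (r - 1) (fun y hy => hs y (List.mem_cons_of_mem _ hy)) ?_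
      simp only [List.length_cons] at hr
      push_cast at hr ⊢; omega

theorem pvPopW_budget (s : List Int) (d r r' : Int)
    (h : (s.length : Int) < r) (h' : (s.length : Int) < r') :
    (pvPopW s d r).1 = (pvPopW s d r').1 ∧ (pvPopW s d r).2 - r = (pvPopW s d r').2 - r' := by
  induction s generalizing r r' with
  | nil => simp [pvPopW]
  | cons x xs ih =>
      simp only [List.length_cons] at h h'
      have h0 : 0 < r := by push_cast at h; omega
      have h0' : 0 < r' := by push_cast at h'; omega
      by_cases hx : x < d
      · simp only [pvPopW, h0, h0', hx, and_self, if_true]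
        have := ih (r - 1) (r' - 1) (by push_cast at h ⊢; omega) (by push_cast at h' ⊢; omega)
        exact ⟨this.1, by omega⟩
      · simp [pvPopW, hx]

-- ---- pvPhase1 bookkeeping ----
theorem pvPhase1_diff (t : List Int) (s : List Int) (r : Int) :
    (pvPhase1 t s r).2 - ((pvPhase1 t s r).1.length : Int) = r - s.length - t.length := by
  induction t generalizing s r with
  | nil => simp [pvPhase1]
  | cons d t ih =>
      obtain ⟨p, hp, hlen, _⟩ := pvPopW_drop s d r
      simp only [pvPhase1, hp]
      have h2 := ih (d :: s.drop p) (r - p)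
      have hL : (((d :: s.drop p).length : Nat) : Int) = (s.length : Int) - p + 1 := by
        simp only [List.length_cons, List.length_drop]
        push_cast [Nat.cast_sub hlen]; ring
      have hT : (((d :: t).length : Nat) : Int) = (t.length : Int) + 1 := by
        simp only [List.length_cons]; push_cast; ring
      omega

theorem pvPhase1_nopop (t : List Int) (s : List Int) (r : Int) (h : r ≤ 0) :
    pvPhase1 t s r = (t.reverse ++ s, r) := by
  induction t generalizing s with
  | nil => simp [pvPhase1]
  | cons d t ih =>
      have hpw : pvPopW s d r = (s, r) := by
        cases s with
        | nil => simp [pvPopW]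
        | cons x xs => simp only [pvPopW, if_neg (by omega : ¬ (0 < r ∧ x < d))]
      simp [pvPhase1, hpw, ih]

-- ---- small list helpers ----
theorem pvTakeSubset (l : List Int) (m n : Nat) (h : m ≤ n) : l.take m ⊆ l.take n := by
  intro x hx
  have he : l.take m = (l.take n).take m := by
    rw [List.take_take, Nat.min_eq_left h]
  rw [he] at hx
  exact List.take_subset _ _ hx

theorem pvDropWhileHead (l : List Int) (a m : Int) (suf : List Int)
    (h : l.dropWhile (fun y => decide (y ≤ a)) = m :: suf) : a < m := by
  induction l with
  | nil => simp [List.dropWhile] at h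
  | cons x xs ih =>
      rw [List.dropWhile_cons] at h
      by_cases hx : x ≤ a
      · rw [if_pos (by simpa using hx)] at h
        exact ih h
      · rw [if_neg (by simpa using hx)] at h
        cases h
        omega

-- ---- pvPhase1: the stack bottom survives / is popped ----
theorem pvPhase1_bottom (t : List Int) (s : List Int) (a r : Int)
    (h : ∀ x ∈ t.take (r - s.length).toNat, x ≤ a) :
    pvPhase1 t (s ++ [a]) r = ((pvPhase1 t s r).1 ++ [a], (pvPhase1 t s r).2) := by
  induction t generalizing s r with
  | nil => simp [pvPhase1]
  | cons d t ih =>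
      obtain ⟨p, hp, hlen, _⟩ := pvPopW_drop s d r
      have hpw : pvPopW (s ++ [a]) d r = ((pvPopW s d r).1 ++ [a], (pvPopW s d r).2) := by
        refine pvPopW_append s a d r ?_
        intro hlt
        refine h d ?_
        cases hq : (r - (s.length : Int)).toNat with
        | zero => omega
        | succ n => simp [List.take_succ_cons]
      simp only [pvPhase1, hpw, hp]
      have heq : d :: (s.drop p ++ [a]) = (d :: s.drop p) ++ [a] := rfl
      rw [heq]
      refine ih (d :: s.drop p) (r - p) ?_
      intro x hx
      have hL : (((d :: s.drop p).length : Nat) : Int) = (s.length : Int) - p + 1 := by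
        simp only [List.length_cons, List.length_drop]
        push_cast [Nat.cast_sub hlen]; ring
      rcases Nat.eq_zero_or_pos (r - (p : Int) - (((d :: s.drop p).length : Nat) : Int)).toNat with h0 | h0
      · rw [h0] at hx
        simp at hx
      · refine h x ?_
        have hkey : (r - (p : Int) - (((d :: s.drop p).length : Nat) : Int)).toNat + 1
            ≤ (r - (s.length : Int)).toNat := by
          rw [hL]; omega
        cases hq : (r - (s.length : Int)).toNat with
        | zero => omega
        | succ n =>
            rw [List.take_succ_cons]
            refine List.mem_cons_of_mem _ (pvTakeSubset t _ n ?_ hx)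
            omega

theorem pvPhase1_popbottom (pre : List Int) (m a : Int) (suf : List Int) (ham : a < m) :
    ∀ (s : List Int) (r : Int), (∀ x ∈ pre, x ≤ a) → (∀ x ∈ s, x ≤ a) →
    (pre.length : Int) + s.length < r →
    pvPhase1 (pre ++ m :: suf) (s ++ [a]) r = pvPhase1 (pre ++ m :: suf) s (r - 1) := by
  induction pre with
  | nil =>
      intro s r _ hs hr
      simp only [List.nil_append, pvPhase1]
      rw [pvPopW_through a m ham s r hs (by simpa using hr)]
  | cons d pre' ih =>
      intro s r hpre hs hr
      have hda : d ≤ a := hpre d List.mem_cons_self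
      simp only [List.cons_append, pvPhase1]
      rw [pvPopW_append s a d r (fun _ => hda)]
      simp only [List.length_cons] at hr
      have hlen2 : (s.length : Int) < r - 1 := by push_cast at hr ⊢; omega
      obtain ⟨hB1, hB2⟩ := pvPopW_budget s d r (r - 1) (by omega) hlen2
      obtain ⟨p, hp, hplen, _⟩ := pvPopW_drop s d (r - 1)
      have h1 : (pvPopW s d r).1 = s.drop p := by rw [hB1, hp]
      have h2 : (pvPopW s d r).2 = r - p := by
        rw [hp] at hB2; simp only at hB2; omega
      rw [h1, h2, hp]
      simp only
      have heq : d :: (s.drop p ++ [a]) = (d :: s.drop p) ++ [a] := rfl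
      rw [heq]
      have hre : r - 1 - (p : Int) = r - (p : Int) - 1 := by ring
      rw [hre]
      refine ih (d :: s.drop p) (r - p)
        (fun x hx => hpre x (List.mem_cons_of_mem _ hx)) ?_ ?_
      · intro x hx
        rcases List.mem_cons.mp hx with hx | hx
        · exact hx ▸ hda
        · exact hs x (List.mem_of_mem_drop hx)
      · have hL : (((d :: s.drop p).length : Nat) : Int) = (s.length : Int) - p + 1 := by
          simp only [List.length_cons, List.length_drop]
          push_cast [Nat.cast_sub hplen]; ring
        rw [hL]
        push_cast at hr ⊢
        omega

-- ---- pvFinPop ----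
theorem pvFinPop_all (l : List Int) (r : Int) (h : (l.length : Int) ≤ r) :
    pvFinPop l r = [] := by
  induction l generalizing r with
  | nil => simp [pvFinPop]
  | cons x xs ih =>
      simp only [List.length_cons] at h
      have h0 : 0 < r := by push_cast at h; omega
      simp only [pvFinPop, h0, if_true]
      exact ih (r - 1) (by push_cast at h ⊢; omega)

theorem pvFinPop_none (l : List Int) (r : Int) (h : r ≤ 0) :
    pvFinPop l r = l := by
  cases l with
  | nil => rfl
  | cons x xs => simp only [pvFinPop, if_neg (by omega : ¬ 0 < r)]

theorem pvFinPop_append (l1 l2 : List Int) (r : Int) (h : r ≤ (l1.length : Int)) :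
    pvFinPop (l1 ++ l2) r = pvFinPop l1 r ++ l2 := by
  induction l1 generalizing r with
  | nil =>
      have h0 : r ≤ 0 := by simpa using h
      simp only [List.nil_append]
      rw [pvFinPop_none l2 r h0]
      simp [pvFinPop]
  | cons x xs ih =>
      by_cases h0 : 0 < r
      · simp only [List.cons_append, pvFinPop, h0, if_true]
        simp only [List.length_cons] at h
        exact ih (r - 1) (by push_cast at h ⊢; omega)
      · simp only [List.cons_append, pvFinPop, h0, if_false]

theorem pvAres_nonpos (l : List Int) (r : Int) (h : r ≤ 0) : pvAres l r = l := by
  unfold pvAres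
  rw [pvPhase1_nopop _ _ _ h]
  simp [pvFinPop_none _ _ h]

-- ---- foldl max helpers ----
theorem pvFoldlMax_const (l : List Int) (a : Int) (h : ∀ y ∈ l, y ≤ a) :
    l.foldl max a = a := by
  induction l with
  | nil => rfl
  | cons x xs ih =>
      simp only [List.foldl_cons]
      rw [max_eq_left (h x List.mem_cons_self)]
      exact ih (fun y hy => h y (List.mem_cons_of_mem _ hy))

theorem pvFoldlMax_max (l : List Int) (a b : Int) :
    l.foldl max (max a b) = max a (l.foldl max b) := by
  induction l generalizing b with
  | nil => rfl
  | cons x xs ih => simp only [List.foldl_cons, max_assoc, ih]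


-- ---- the central lemma: A's stack result = leftmost-max windowed selection ----
theorem pvMain : ∀ (N : Nat) (l : List Int) (k : Nat), l.length ≤ N → k ≤ l.length →
    pvAres l ((l.length : Int) - k) = pvChoose k l := by
  intro N
  induction N with
  | zero =>
      intro l k hN hk
      have hl : l = [] := List.length_eq_zero_iff.mp (Nat.le_zero.mp hN)
      subst hl
      have hk0 : k = 0 := Nat.le_zero.mp hk
      subst hk0
      rfl
  | succ N ihN =>
      intro l k hN hk
      cases k with
      | zero =>
          have hb : ((pvPhase1 l [] ((l.length : Int) - ((0:Nat) : Int))).1.length : Int)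
              ≤ (pvPhase1 l [] ((l.length : Int) - ((0:Nat) : Int))).2 := by
            have := pvPhase1_diff l [] ((l.length : Int) - ((0:Nat) : Int))
            simp only [List.length_nil] at this
            push_cast at this ⊢
            omega
          show pvAres l ((l.length : Int) - ((0:Nat) : Int)) = []
          unfold pvAres
          rw [pvFinPop_all _ _ hb]
          rfl
      | succ k' =>
          cases l with
          | nil => simp at hk
          | cons a t =>
              simp only [List.length_cons] at hk hN
              have hk't : k' ≤ t.length := by omega
              set r : Int := (((a :: t).length : Int)) - (((k' + 1 : Nat)) : Int) with hrdef
              have hrt : r = (t.length : Int) - (k' : Int) := by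
                simp only [hrdef, List.length_cons]; push_cast; ring
              have hr0 : 0 ≤ r := by rw [hrt]; push_cast; omega
              have hrle : r ≤ (t.length : Int) := by rw [hrt]; push_cast; omega
              have hwlen : (a :: t).length - k' = r.toNat + 1 := by
                simp only [List.length_cons]; omega
              by_cases hS : ∀ x ∈ t.take r.toNat, x ≤ a
              · -- the head is the leftmost maximum of the window: it survives
                have hmax0 : PySem.List.max? ((a :: t).take ((a :: t).length - k'))
                    (fun x => x) = some a := by
                  rw [hwlen, List.take_succ_cons, PySem.List.max?_id_cons,
                      pvFoldlMax_const (t.take r.toNat) a hS]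
                have hidx0 : PySem.List.index? ((a :: t).take ((a :: t).length - k')) a
                    = some 0 := by
                  rw [hwlen, List.take_succ_cons]
                  exact PySem.List.index?_cons_self a _
                have hchoose : pvChoose (k' + 1) (a :: t) = a :: pvChoose k' t := by
                  rw [pvChoose_succ_some k' (a :: t) a hmax0, hidx0]
                  simp
                have hAside : pvAres (a :: t) r = a :: pvAres t r := by
                  unfold pvAres
                  have step : pvPhase1 (a :: t) [] r = pvPhase1 t ([] ++ [a]) r := rfl
                  rw [step, pvPhase1_bottom t [] a r (by simpa using hS)]
                  have hP : (pvPhase1 t [] r).2 ≤ ((pvPhase1 t [] r).1.length : Int) := by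
                    have := pvPhase1_diff t [] r
                    simp only [List.length_nil] at this
                    push_cast at this
                    omega
                  rw [pvFinPop_append _ _ _ hP]
                  simp [List.reverse_append]
                rw [hAside, hchoose]
                have := ihN t k' (by omega) hk't
                rw [hrt, this]
              · -- some strictly larger digit lies in the window: the head is popped
                push_neg at hS
                obtain ⟨x, hxmem, hax⟩ := hS
                set pre := t.takeWhile (fun y => decide (y ≤ a)) with hpredef
                set rest := t.dropWhile (fun y => decide (y ≤ a)) with hrestdef
                have hsplit : pre ++ rest = t := List.takeWhile_append_dropWhile
                have hpre : ∀ y ∈ pre, y ≤ a := by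
                  intro y hy
                  have := List.mem_takeWhile_imp hy
                  simpa using this
                cases hrest : rest with
                | nil =>
                    exfalso
                    have hx' : x ∈ t := List.take_subset _ _ hxmem
                    rw [← hsplit, hrest, List.append_nil] at hx'
                    exact absurd (hpre x hx') (by omega)
                | cons m suf =>
                    have ht : t = pre ++ m :: suf := by rw [← hsplit, hrest]
                    have ham : a < m := pvDropWhileHead t a m suf (by rw [← hrestdef, hrest])
                    have hplen : (pre.length : Int) < r := by
                      by_contra hcon
                      push_neg at hcon
                      have htake : t.take r.toNat = pre.take r.toNat := by
                        conv_lhs => rw [← hsplit]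
                        rw [List.take_append_of_le_length (by omega : r.toNat ≤ pre.length)]
                      rw [htake] at hxmem
                      exact absurd (hpre x (List.take_subset _ _ hxmem)) (by omega)
                    have hAside : pvAres (a :: t) r = pvAres t (r - 1) := by
                      unfold pvAres
                      have step : pvPhase1 (a :: t) [] r = pvPhase1 t ([] ++ [a]) r := rfl
                      rw [step]
                      conv_lhs => rw [ht]
                      conv_rhs => rw [ht]
                      rw [pvPhase1_popbottom pre m a suf ham [] r hpre (by simp)
                        (by simpa using hplen)]
                    have hw'ne : t.take r.toNat ≠ [] := by
                      have h1 : t ≠ [] := by rw [ht]; simp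
                      have h2 : 1 ≤ r.toNat := by omega
                      intro hnil
                      rcases List.take_eq_nil_iff.mp hnil with h | h
                      · omega
                      · exact h1 h
                    cases hw : t.take r.toNat with
                    | nil => exact absurd hw hw'ne
                    | cons y restw =>
                        have hmaxw' : PySem.List.max? (t.take r.toNat) (fun x => x)
                            = some (restw.foldl max y) := by
                          rw [hw]; exact PySem.List.max?_id_cons y restw
                        set M := restw.foldl max y with hMdef
                        have haM : a < M := by
                          have := PySem.List.max?_isMax hmaxw' x hxmem
                          simp only at this
                          omega
                        have hMmem : M ∈ t.take r.toNat := PySem.List.max?_mem hmaxw'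
                        obtain ⟨i, hi⟩ : ∃ i, PySem.List.index? (t.take r.toNat) M = some i :=
                          Option.isSome_iff_exists.mp ((PySem.List.index?_isSome_iff _ _).mpr hMmem)
                        have htlen : t.length - k' = r.toNat := by omega
                        have hfold : (t.take r.toNat).foldl max a = M := by
                          rw [hw]
                          simp only [List.foldl_cons]
                          have : max a y = max a y := rfl
                          calc restw.foldl max (max a y)
                              = max a (restw.foldl max y) := pvFoldlMax_max restw a y
                            _ = M := by rw [← hMdef]; exact max_eq_right (le_of_lt haM)
                        have hmax1 : PySem.List.max? ((a :: t).take ((a :: t).length - k'))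
                            (fun x => x) = some M := by
                          rw [hwlen, List.take_succ_cons, PySem.List.max?_id_cons, hfold]
                        have hidx1 : PySem.List.index? ((a :: t).take ((a :: t).length - k')) M
                            = some (i + 1) := by
                          rw [hwlen, List.take_succ_cons,
                            PySem.List.index?_cons_of_ne _ (by omega : a ≠ M), hi]
                          rfl
                        have hmax2 : PySem.List.max? (t.take (t.length - k')) (fun x => x)
                            = some M := by rw [htlen]; exact hmaxw'
                        have hidx2 : PySem.List.index? (t.take (t.length - k')) M = some i := by
                          rw [htlen]; exact hi
                        have hc1 : pvChoose (k' + 1) (a :: t) = M :: pvChoose k' (t.drop (i + 1)) := by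
                          rw [pvChoose_succ_some k' (a :: t) M hmax1, hidx1]
                          simp only [Option.getD_some, List.drop_succ_cons]
                        have hc2 : pvChoose (k' + 1) t = M :: pvChoose k' (t.drop (i + 1)) := by
                          rw [pvChoose_succ_some k' t M hmax2, hidx2]
                          simp only [Option.getD_some]
                        have hk1t : k' + 1 ≤ t.length := by omega
                        have hIH := ihN t (k' + 1) (by omega) hk1t
                        have hr1 : r - 1 = (t.length : Int) - (((k' + 1 : Nat)) : Int) := by
                          rw [hrt]; push_cast; ring
                        rw [hAside, hr1, hIH, hc2, hc1]

-- ---- B's loop computes pvChoose folded ----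
theorem pvBLoop_choose (digits : List Int) (k : Int) :
    ∀ (c start : Nat) (out : Int), start + c ≤ digits.length →
    pvBLoop digits (digits.length : Int) k c (start : Int) out
      = (pvChoose c (digits.drop start)).foldl (fun j d => j * 10 + d) out := by
  intro c
  induction c with
  | zero =>
      intro start out h
      simp [pvBLoop, pvChoose]
  | succ c' ih =>
      intro start out h
      have hc' : c' ≤ digits.length := by omega
      have e1 : (digits.length : Int) - (k - 1 - (k - ((c' : Int) + 1)))
          = ((digits.length - c' : Nat) : Int) := by
        push_cast [Nat.cast_sub hc']; ring
      simp only [pvBLoop]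
      rw [e1, PySem.List.slice_natCast]
      have e2 : digits.length - c' - start = (digits.drop start).length - c' := by
        simp only [List.length_drop]; omega
      rw [e2]
      have hwne : (digits.drop start).take ((digits.drop start).length - c') ≠ [] := by
        intro hnil
        have hlt : ((digits.drop start).take ((digits.drop start).length - c')).length
            = min ((digits.drop start).length - c') (digits.drop start).length :=
          List.length_take
        rw [hnil] at hlt
        simp only [List.length_nil, List.length_drop] at hlt
        omega
      obtain ⟨M, hM⟩ : ∃ M, PySem.List.max?
          ((digits.drop start).take ((digits.drop start).length - c')) (fun x => x) = some M := by
        cases hh : PySem.List.max?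
            ((digits.drop start).take ((digits.drop start).length - c')) (fun x => x) with
        | none => exact absurd ((PySem.List.max?_eq_none_iff _ _).mp hh) hwne
        | some M => exact ⟨M, rfl⟩
      have hMmem := PySem.List.max?_mem hM
      obtain ⟨i, hi⟩ : ∃ i, PySem.List.index?
          ((digits.drop start).take ((digits.drop start).length - c')) M = some i :=
        Option.isSome_iff_exists.mp ((PySem.List.index?_isSome_iff _ _).mpr hMmem)
      obtain ⟨hilt, -⟩ := PySem.List.getElem_of_index?_eq_some hi
      have hibound : start + i + 1 + c' ≤ digits.length := by
        simp only [List.length_take, List.length_drop] at hilt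
        omega
      rw [hM]
      simp only [Option.getD_some]
      rw [hi]
      simp only [Option.map_some, Option.getD_some, Int.ofNat_eq_natCast]
      have e3 : (start : Int) + ((i : Nat) : Int) + 1 = ((start + i + 1 : Nat) : Int) := by
        push_cast; ring
      rw [e3, ih (start + i + 1) (out * 10 + M) hibound]
      have hcstep : pvChoose (c' + 1) (digits.drop start)
          = M :: pvChoose c' (digits.drop (start + i + 1)) := by
        rw [pvChoose_succ_some c' (digits.drop start) M hM, hi]
        simp only [Option.getD_some]
        rw [List.drop_drop, show start + (i + 1) = start + i + 1 from by omega]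
      rw [hcstep, List.foldl_cons]

-- ===== VERDICT (by name: the statement is the Claim_ definition above) =====
theorem joltage_of_spec : Claim_equal_joltage_of := by
  intro bank num hdom hpre
  unfold Spec_joltage_of
  set ds := bank.toList.map pvDigit with hds
  change pvFold (pvAres ds ((ds.length : Int) - num))
      = pvBLoop ds (ds.length : Int) (min num (ds.length : Int))
          (max (min num (ds.length : Int)) 0).toNat 0 0
  set k := min num (ds.length : Int) with hk
  by_cases hk0 : k ≤ 0
  · have hmax : (max k 0).toNat = 0 := by rw [max_eq_right hk0]; rfl
    rw [hmax]
    have hnil : pvAres ds ((ds.length : Int) - num) = [] := by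
      rcases le_or_gt num 0 with h | h
      · unfold pvAres
        have hb : ((pvPhase1 ds [] ((ds.length : Int) - num)).1.length : Int)
            ≤ (pvPhase1 ds [] ((ds.length : Int) - num)).2 := by
          have := pvPhase1_diff ds [] ((ds.length : Int) - num)
          simp only [List.length_nil] at this
          push_cast at this
          omega
        rw [pvFinPop_all _ _ hb]
        rfl
      · have hn0 : (ds.length : Int) ≤ 0 := by
          by_contra hh
          push_neg at hh
          have := lt_min h hh
          rw [← hk] at this
          omega
        have hdnil : ds = [] := List.length_eq_zero_iff.mp (by omega)
        rw [hdnil]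
        rfl
    rw [hnil]
    rfl
  · push_neg at hk0
    have hkn : k ≤ (ds.length : Int) := min_le_right _ _
    have hKle : k.toNat ≤ ds.length := by omega
    have hmax : (max k 0).toNat = k.toNat := by rw [max_eq_left (le_of_lt hk0)]
    rw [hmax]
    have hb := pvBLoop_choose ds k k.toNat 0 0 (by omega)
    simp only [Nat.cast_zero, List.drop_zero] at hb
    rw [hb, ← pvMain ds.length ds k.toNat le_rfl hKle]
    have harg : pvAres ds ((ds.length : Int) - num)
        = pvAres ds ((ds.length : Int) - ((k.toNat : Nat) : Int)) := by
      rcases le_or_gt num (ds.length : Int) with h | h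
      · have hknum : k = num := min_eq_left h
        rw [show (((k.toNat : Nat)) : Int) = num by omega]
      · have hkn' : k = (ds.length : Int) := min_eq_right (le_of_lt h)
        rw [show ((ds.length : Int) - ((k.toNat : Nat) : Int)) = 0 by omega]
        rw [pvAres_nonpos ds _ (by omega), pvAres_nonpos ds 0 le_rfl]
    rw [harg]
    rfl
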